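-- pv_equiv track=rewrite | github.com/AlienFoun/Marcus | Marcus_not_network.py | cutter
-- ===== SOURCE A (Python) =====
-- def cutter(text):
--     total = []  # Создание списка для вывода
--     n = 0  # Счетчик количества символов
--     while ' '.join(text) not in total:  # Проверка, находится ли входной текст в списке вывода
--         prom = []  # создание/очистка промежуточного списка
--         i = 0  # Счетчик цикла
--         while i < len(text):
--             prom.append(text[i])  # Добавляем элементы в промежуточный список
--             if len(prom) == n + 1:  # Нужно нарезать список сначала по одному слову,
--                 # потом по 2, 3 и т.д., тут происходит проверка на количество символов
--                 total.append(' '.join(prom))  # Если верно, то добавляем в список вывода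
--                 prom = []  # Очищаем промежуточный список
--                 i -= n  # Сдвигаемся на n индексов назад
--             i += 1
--         n += 1
--     return total  # Возвращаем список вывода
-- ===== SOURCE B (Python) =====
-- def cutter(text):
--     n = len(text)
--     return [' '.join(text[i:i + k]) for k in range(1, n + 1) for i in range(n - k + 1)]
-- ===== Notes on version B (the rewrite author's own statement) =====
-- stated objective: faster
-- what changed: B builds the windows directly as a nested comprehension over window sizes 1..len(text), replacing A's rewinding index loop and its per-round membership scan of the whole-text join against the growing output list; intended as faster (a timing run measured ~13x at n=256, the largest size at which both finished).
-- outside the precondition, e.g. on cutter([]): A does not finish within the time limit, B returns []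
import Mathlib
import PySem

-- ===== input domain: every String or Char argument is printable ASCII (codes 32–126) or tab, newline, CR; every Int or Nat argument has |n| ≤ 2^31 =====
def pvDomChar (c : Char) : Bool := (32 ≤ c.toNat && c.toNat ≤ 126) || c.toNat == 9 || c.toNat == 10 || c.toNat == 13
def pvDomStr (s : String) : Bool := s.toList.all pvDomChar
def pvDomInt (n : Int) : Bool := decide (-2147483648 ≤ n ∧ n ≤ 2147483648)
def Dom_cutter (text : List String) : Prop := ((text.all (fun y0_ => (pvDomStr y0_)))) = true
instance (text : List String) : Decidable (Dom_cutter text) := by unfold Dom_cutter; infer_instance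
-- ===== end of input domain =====

-- B replaces A's rewinding index loop and per-round membership scan by a direct nested
-- comprehension over window sizes; intended as faster (a timing run measured ~13x at
-- n=256, the largest size where both finished).

-- ===== PORT A =====
-- Inner while loop of A, state (i, prom, total); i and n are kept as Nat: in every run of A
-- they satisfy 0 ≤ i and n ≤ i at the subtraction point, so Nat arithmetic is exact there.
-- The fuel argument only makes the loop total; it is never exhausted on the runs cutter makes.
def cutterInner (text : List String) (n : Nat) : Nat → Nat → List String → List String → List String
  | 0, _, _, total => total
  | f + 1, i, prom, total =>
    if i < text.length then
      -- prom.append(text[i]); i < len(text) here, so getD reads text[i]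
      if (prom ++ [text.getD i ""]).length = n + 1 then
        cutterInner text n f (i - n + 1) [] (total ++ [PySem.Str.join " " (prom ++ [text.getD i ""])])
      else
        cutterInner text n f (i + 1) (prom ++ [text.getD i ""]) total
    else total

-- Outer while loop of A; guard = «' '.join(text) not in total».  Fuel len(text)+1 covers every
-- terminating run of A (the guard fires at n = len(text)); on [] Python's loop never terminates
-- (excluded by Pre_cutter below).
def cutterOuter (text : List String) : Nat → Nat → List String → List String
  | 0, _, total => total
  | f + 1, n, total =>
    if PySem.Str.join " " text ∈ total then total
    else cutterOuter text f (n + 1)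
      (cutterInner text n (text.length * (n + 1) + 1) 0 [] total)

def cutter (text : List String) : List String :=
  cutterOuter text (text.length + 1) 0 []

-- ===== PORT B =====
-- [' '.join(text[i:i+k]) for k in range(1, n+1) for i in range(n-k+1)]
def cutter_alt (text : List String) : List String :=
  (PySem.List.pyRange 1 ((text.length : Int) + 1) 1).flatMap (fun k =>
    (PySem.List.pyRange 0 ((text.length : Int) - k + 1) 1).map (fun i =>
      PySem.Str.join " " (PySem.List.slice text (some i) (some (i + k)))))

-- ===== PRECONDITION & SPEC =====
-- Pre_ excludes only the empty list, on which A's outer while-loop never terminates (the join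
-- of the empty list is never added to total), so A returns on exactly the inputs in Pre_.
def Pre_cutter (text : List String) : Prop := text ≠ []
instance (text : List String) : Decidable (Pre_cutter text) := by unfold Pre_cutter; infer_instance

def pvWitness_cutter : List String := (["a", "b"])

def Spec_cutter (text : List String) (out : List String) : Prop := out = cutter_alt text
instance (text : List String) (out : List String) : Decidable (Spec_cutter text out) := by unfold Spec_cutter; infer_instance

-- ===== CLAIM (what is proved, stated in full; the proofs are below) =====
def Claim_equal_cutter : Prop := ∀ (text : List String), Dom_cutter text → Pre_cutter text → Spec_cutter text (cutter text)

-- ===== LEMMAS AND PROOFS =====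

-- the joined windows of size n+1 whose start is ≥ s
def winsFrom (text : List String) (n s : Nat) : List String :=
  (List.range (text.length - n - s)).map
    (fun j => PySem.Str.join " " ((text.drop (s + j)).take (n + 1)))

-- total after the outer rounds 0 .. m-1
def totAfter (text : List String) : Nat → List String
  | 0 => []
  | m + 1 => totAfter text m ++ winsFrom text m 0

-- length of an intercalation by a one-character separator
theorem length_intercalate_single (sep : List Char) (hs : sep.length = 1) :
    ∀ (L : List (List Char)),
      (List.intercalate sep L).length = (L.map List.length).sum + (L.length - 1)
  | [] => by simp [List.intercalate]
  | [x] => by simp [List.intercalate]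
  | x :: y :: t => by
    have ih := length_intercalate_single sep hs (y :: t)
    have h2 : List.intercalate sep (x :: y :: t) = x ++ sep ++ List.intercalate sep (y :: t) := by
      simp [List.intercalate, List.intersperse]
    rw [h2]
    simp only [List.length_append, hs] at *
    simp only [List.map_cons, List.sum_cons, List.length_cons] at *
    omega

theorem sum_lengths_window_le (cs : List (List Char)) (s k : Nat) :
    (((cs.drop s).take k).map List.length).sum ≤ (cs.map List.length).sum := by
  have h1 : (cs.map List.length).sum
      = ((cs.take s).map List.length).sum + ((cs.drop s).map List.length).sum := by
    rw [← List.sum_append, ← List.map_append, List.take_append_drop]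
  have h2 : ((cs.drop s).map List.length).sum
      = (((cs.drop s).take k).map List.length).sum + (((cs.drop s).drop k).map List.length).sum := by
    rw [← List.sum_append, ← List.map_append, List.take_append_drop]
  omega

-- a proper full window's join is never the join of the whole text (its length is smaller)
theorem window_join_ne (text : List String) (s k : Nat)
    (hk1 : 1 ≤ k) (hkL : k < text.length) (hsk : s + k ≤ text.length) :
    PySem.Str.join " " ((text.drop s).take k) ≠ PySem.Str.join " " text := by
  intro h
  have h' := congrArg String.toList h
  rw [PySem.Str.toList_join, PySem.Str.toList_join] at h'
  have hlen := congrArg List.length h'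
  simp only [PySem.Chars.join] at hlen
  have hsep : (" ".toList).length = 1 := by decide
  rw [length_intercalate_single _ hsep, length_intercalate_single _ hsep] at hlen
  have hmapdt : ((text.drop s).take k).map String.toList
      = ((text.map String.toList).drop s).take k := by
    rw [List.map_take, List.map_drop]
  rw [hmapdt] at hlen
  have hsum := sum_lengths_window_le (text.map String.toList) s k
  have hlw : (((text.map String.toList).drop s).take k).length = k := by
    simp; omega
  have hLl : (text.map String.toList).length = text.length := by simp
  rw [hlw, hLl] at hlen
  omega

-- membership characterisation of totAfter
theorem mem_totAfter (text : List String) (m : Nat) (x : String) (hx : x ∈ totAfter text m) :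
    ∃ k s, 1 ≤ k ∧ k ≤ m ∧ s + k ≤ text.length ∧
      x = PySem.Str.join " " ((text.drop s).take k) := by
  induction m with
  | zero => simp [totAfter] at hx
  | succ m ih =>
    simp only [totAfter, List.mem_append] at hx
    rcases hx with hx | hx
    · obtain ⟨k, s, h1, h2, h3, h4⟩ := ih hx
      exact ⟨k, s, h1, Nat.le_succ_of_le h2, h3, h4⟩
    · simp only [winsFrom, List.mem_map, List.mem_range] at hx
      obtain ⟨j, hj, hx⟩ := hx
      exact ⟨m + 1, j, by omega, le_rfl, by omega, by simpa using hx.symm⟩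

theorem join_not_mem_totAfter (text : List String) (m : Nat) (hm : m < text.length) :
    PySem.Str.join " " text ∉ totAfter text m := by
  intro hmem
  obtain ⟨k, s, h1, h2, h3, h4⟩ := mem_totAfter text m _ hmem
  exact window_join_ne text s k h1 (by omega) h3 h4.symm

theorem join_mem_totAfter_len (text : List String) (hne : text ≠ []) :
    PySem.Str.join " " text ∈ totAfter text text.length := by
  have hL : 1 ≤ text.length := List.length_pos_iff.mpr hne
  obtain ⟨L', hL'⟩ : ∃ L', text.length = L' + 1 := ⟨text.length - 1, by omega⟩
  rw [hL']
  simp only [totAfter, List.mem_append]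
  right
  have : text.length - L' - 0 = 1 := by omega
  simp only [winsFrom, this, List.range_one, List.map_cons, List.map_nil, List.mem_singleton]
  have : (text.drop (0 + 0)).take (L' + 1) = text := by
    simp [← hL']
  rw [this]

-- one element appended to a partial window
theorem take_push (text : List String) (s p : Nat) (h : s + p < text.length) :
    (text.drop s).take p ++ [text.getD (s + p) ""] = (text.drop s).take (p + 1) := by
  rw [List.take_add_one]
  congr 1
  have h1 : (text.drop s)[p]? = text[s + p]? := by
    rw [List.getElem?_drop]
  have h2 : text[s + p]? = some (text[s + p]'h) := List.getElem?_eq_getElem h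
  rw [h1, h2]
  simp [List.getD_eq_getElem?_getD, h2]

-- consuming one full window: from the start of a window with p elements already collected
theorem inner_segment (text : List String) (n : Nat) :
    ∀ (q : Nat) (f s : Nat) (total : List String), q ≤ n → s + (n + 1) ≤ text.length →
      cutterInner text n (f + (q + 1)) (s + (n - q)) ((text.drop s).take (n - q)) total
        = cutterInner text n f (s + 1) []
            (total ++ [PySem.Str.join " " ((text.drop s).take (n + 1))]) := by
  intro q
  induction q with
  | zero =>
    intro f s total _ hs
    have hi : s + (n - 0) < text.length := by omega
    simp only [Nat.sub_zero] at *
    show cutterInner text n (f + 1) (s + n) ((text.drop s).take n) total = _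
    rw [cutterInner]
    rw [if_pos hi]
    have hpush := take_push text s n (by omega)
    simp only [hpush]
    have hlen : ((text.drop s).take (n + 1)).length = n + 1 := by
      simp; omega
    rw [if_pos hlen]
    have : s + n - n + 1 = s + 1 := by omega
    rw [this]
  | succ q ih =>
    intro f s total hq hs
    have hp : n - (q + 1) + 1 = n - q := by omega
    have hi : s + (n - (q + 1)) < text.length := by omega
    show cutterInner text n ((f + (q + 1)) + 1) (s + (n - (q + 1))) _ total = _
    rw [cutterInner]
    rw [if_pos hi]
    have hpush := take_push text s (n - (q + 1)) (by omega)
    simp only [hpush, hp]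
    have hlen : ((text.drop s).take (n - q)).length = n - q := by
      simp; omega
    rw [hlen, if_neg (by omega)]
    have harg : s + (n - (q + 1)) + 1 = s + (n - q) := by omega
    rw [harg]
    exact ih f s total (by omega) hs

-- the tail of the text, too short for another window, is consumed without output
theorem inner_tail (text : List String) (n : Nat) :
    ∀ (d f i : Nat) (prom total : List String), text.length - i = d → i ≤ text.length →
      prom.length + (text.length - i) ≤ n →
      cutterInner text n (f + d + 1) i prom total = total := by
  intro d
  induction d with
  | zero =>
    intro f i prom total hd hi _
    rw [cutterInner, if_neg (by omega)]
  | succ d ih =>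
    intro f i prom total hd hi hp
    rw [show f + (d + 1) + 1 = (f + d + 1) + 1 from by omega, cutterInner, if_pos (by omega)]
    have hlen : (prom ++ [text.getD i ""]).length = prom.length + 1 := by simp
    rw [hlen, if_neg (show ¬ (prom.length + 1 = n + 1) from by omega)]
    exact ih f (i + 1) _ total (by omega) (by omega) (by simp; omega)

-- the head window split off winsFrom
theorem winsFrom_cons (text : List String) (n s : Nat) (h : s + (n + 1) ≤ text.length) :
    winsFrom text n s
      = PySem.Str.join " " ((text.drop s).take (n + 1)) :: winsFrom text n (s + 1) := by
  simp only [winsFrom]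
  have hc : text.length - n - s = (text.length - n - (s + 1)) + 1 := by omega
  rw [hc, List.range_succ_eq_map, List.map_cons, List.map_map]
  congr 1
  apply List.map_congr_left
  intro j _
  simp only [Function.comp]
  rw [show s + (j + 1) = s + 1 + j from by omega]

-- the inner loop from a window start s produces exactly the remaining windows
theorem inner_main (text : List String) (n : Nat) :
    ∀ (d f s : Nat) (total : List String), text.length - s = d → s ≤ text.length →
      cutterInner text n (f + (text.length - s) * (n + 1) + 1) s [] total
        = total ++ winsFrom text n s := by
  intro d
  induction d with
  | zero =>
    intro f s total hd hs
    have h0 : (text.length - s) = 0 := hd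
    rw [h0, Nat.zero_mul]
    have : winsFrom text n s = [] := by
      simp only [winsFrom]
      have : text.length - n - s = 0 := by omega
      rw [this]; simp
    rw [this, List.append_nil]
    exact inner_tail text n 0 f s [] total (by omega) hs (by simp; omega)
  | succ d ih =>
    intro f s total hd hs
    by_cases hwin : s + (n + 1) ≤ text.length
    · -- a full window fits at s
      have hfuel : (text.length - s) * (n + 1) = (n + 1) + (text.length - (s + 1)) * (n + 1) := by
        have h1 : text.length - s = (text.length - (s + 1)) + 1 := by omega
        rw [h1]; ring
      rw [hfuel, show f + ((n + 1) + (text.length - (s + 1)) * (n + 1)) + 1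
            = (f + (text.length - (s + 1)) * (n + 1) + 1) + (n + 1) from by omega]
      have hseg := inner_segment text n n (f + (text.length - (s + 1)) * (n + 1) + 1) s total
        le_rfl hwin
      simp only [Nat.sub_self, List.take_zero, Nat.add_zero] at hseg
      rw [hseg]
      rw [ih f (s + 1) _ (by omega) (by omega)]
      rw [winsFrom_cons text n s hwin]
      simp
    · -- no further window fits: tail
      have hw0 : winsFrom text n s = [] := by
        simp only [winsFrom]
        have : text.length - n - s = 0 := by omega
        rw [this]; simp
      rw [hw0, List.append_nil]
      have hsplit : (text.length - s) * (n + 1) = (text.length - s) * n + (text.length - s) := by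
        ring
      rw [hsplit, show f + ((text.length - s) * n + (text.length - s)) + 1
            = (f + (text.length - s) * n) + (text.length - s) + 1 from by omega]
      exact inner_tail text n (text.length - s) _ s [] total rfl hs (by simp; omega)

theorem outer_main (text : List String) (hne : text ≠ []) :
    ∀ (d f n : Nat), text.length - n = d → n ≤ text.length →
      cutterOuter text (f + (text.length - n) + 1) n (totAfter text n)
        = totAfter text text.length := by
  intro d
  induction d with
  | zero =>
    intro f n hd hn
    have hnL : n = text.length := by omega
    subst hnL
    rw [show f + (text.length - text.length) + 1 = f + 1 from by omega, cutterOuter,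
      if_pos (by simpa using join_mem_totAfter_len text hne)]
  | succ d ih =>
    intro f n hd hn
    have hnL : n < text.length := by omega
    rw [show f + (text.length - n) + 1 = (f + (text.length - (n + 1)) + 1) + 1 from by omega,
      cutterOuter, if_neg (join_not_mem_totAfter text n hnL)]
    have hin := inner_main text n (text.length - 0) 0 0 (totAfter text n) rfl (by omega)
    simp only [Nat.sub_zero, Nat.zero_add] at hin
    rw [hin]
    have : totAfter text n ++ winsFrom text n 0 = totAfter text (n + 1) := rfl
    rw [this]
    exact ih f (n + 1) (by omega) (by omega)

theorem cutter_eq_totAfter (text : List String) (hne : text ≠ []) :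
    cutter text = totAfter text text.length := by
  have h := outer_main text hne (text.length - 0) 0 0 rfl (by omega)
  simp only [Nat.sub_zero, Nat.zero_add, totAfter] at h
  unfold cutter
  exact h

-- totAfter as a flatten, to meet B's flatMap
theorem totAfter_eq_flatten (text : List String) (m : Nat) :
    totAfter text m = ((List.range m).map (fun n => winsFrom text n 0)).flatten := by
  induction m with
  | zero => simp [totAfter]
  | succ m ih => rw [totAfter, ih, List.range_succ]; simp

theorem flatMap_eq_flatten_map {α β : Type} (f : α → List β) (l : List α) :
    l.flatMap f = (l.map f).flatten := by
  induction l with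
  | nil => rfl
  | cons a t ih => simp [List.flatMap_cons, ih]

theorem cutter_alt_eq_totAfter (text : List String) :
    cutter_alt text = totAfter text text.length := by
  rw [totAfter_eq_flatten]
  unfold cutter_alt
  rw [flatMap_eq_flatten_map]
  rw [PySem.List.pyRange_one 1 ((text.length : Int) + 1)]
  have hcnt : (((text.length : Int) + 1) - 1).toNat = text.length := by omega
  rw [hcnt, List.map_map]
  congr 1
  apply List.map_congr_left
  intro j hj
  rw [List.mem_range] at hj
  simp only [Function.comp]
  have hb : (text.length : Int) - (1 + (j : Int)) + 1 = ((text.length - j : Nat) : Int) := by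
    omega
  rw [hb, PySem.List.pyRange_one 0, List.map_map]
  have hcnt2 : (((text.length - j : Nat) : Int) - 0).toNat = text.length - j := by omega
  rw [hcnt2]
  simp only [winsFrom, Nat.sub_zero]
  apply List.map_congr_left
  intro s _
  simp only [Function.comp, zero_add]
  have e2 : (s : Int) + (1 + (j : Int)) = (s : Int) + ((j + 1 : Nat) : Int) := by
    push_cast; ring
  rw [e2, PySem.List.slice_natCast_add]

-- ===== VERDICT (by name: the statement is the Claim_ definition above) =====
theorem cutter_spec : Claim_equal_cutter := by
  intro text _ hpre
  unfold Spec_cutter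
  rw [cutter_eq_totAfter text hpre, cutter_alt_eq_totAfter]
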